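-- pv_equiv track=rewrite | github.com/kana800/playground | 4-Visualization/sorting_algorithm_visualizer/python/mergesort.py | colorarray
-- ===== SOURCE A (Python) =====
-- def colorarray(n,left,mid,right):
--     colorarr=[]
--     for i in range(n):
--         if i >= left and i <= right:
--             if i>=left and i <= mid:
--                 colorarr.append("yellow")
--             else:
--                 colorarr.append("green")
--         else:
--             colorarr.append("blue")
--     return colorarr
-- ===== SOURCE B (Python) =====
-- def colorarray(n, left, mid, right):
--     colorarr = ["blue"] * max(n, 0)
--     ylo = max(left, 0)
--     yhi = min(mid, right, n - 1)
--     if ylo <= yhi: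
--         colorarr[ylo:yhi + 1] = ["yellow"] * (yhi - ylo + 1)
--     glo = max(left, mid + 1, 0)
--     ghi = min(right, n - 1)
--     if glo <= ghi:
--         colorarr[glo:ghi + 1] = ["green"] * (ghi - glo + 1)
--     return colorarr
-- ===== Notes on version B (the rewrite author's own statement) =====
-- stated objective: simpler
-- what changed: Replaces A's per-index branching loop over range(n) with an all-"blue" list of length max(n,0) plus two clamped slice assignments (yellow over [max(left,0), min(mid,right,n-1)], green over [max(left,mid+1,0), min(right,n-1)]).
import Mathlib
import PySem

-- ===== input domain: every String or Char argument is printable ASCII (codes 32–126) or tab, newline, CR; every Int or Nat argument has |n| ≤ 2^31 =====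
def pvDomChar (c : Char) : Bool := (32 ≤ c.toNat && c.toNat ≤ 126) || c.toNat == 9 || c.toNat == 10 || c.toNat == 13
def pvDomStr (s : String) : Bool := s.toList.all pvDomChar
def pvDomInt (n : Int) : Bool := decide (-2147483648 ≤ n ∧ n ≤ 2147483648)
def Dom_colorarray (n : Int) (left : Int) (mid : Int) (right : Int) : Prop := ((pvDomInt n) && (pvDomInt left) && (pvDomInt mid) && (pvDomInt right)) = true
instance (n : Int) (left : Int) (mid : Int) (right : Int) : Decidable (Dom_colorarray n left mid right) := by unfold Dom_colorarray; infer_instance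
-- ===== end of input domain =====

-- B replaces A's per-index branching loop by one all-"blue" list with two clamped
-- slice assignments (objective: simpler); same return value on every input.

-- ===== PORT A =====
-- literal port of A: loop over range(n), appending one colour per index
def colorarray (n : Int) (left : Int) (mid : Int) (right : Int) : List String :=
  (PySem.List.pyRange 0 n 1).foldl
    (fun colorarr i =>
      if i ≥ left ∧ i ≤ right then
        if i ≥ left ∧ i ≤ mid then colorarr ++ ["yellow"]
        else colorarr ++ ["green"]
      else colorarr ++ ["blue"])
    []

-- ===== PORT B =====
-- colorarr[lo:lo+len] = [s]*len  (equal-length slice assignment, in-range by the guards in B)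
def pvSetRange (xs : List String) (lo len : Nat) (s : String) : List String :=
  xs.take lo ++ List.replicate len s ++ xs.drop (lo + len)

def colorarray_alt (n : Int) (left : Int) (mid : Int) (right : Int) : List String :=
  let base := List.replicate (max n 0).toNat "blue"
  let ylo := max left 0
  let yhi := min (min mid right) (n - 1)
  let c1 := if ylo ≤ yhi then pvSetRange base ylo.toNat (yhi - ylo + 1).toNat "yellow" else base
  let glo := max (max left (mid + 1)) 0
  let ghi := min right (n - 1)
  if glo ≤ ghi then pvSetRange c1 glo.toNat (ghi - glo + 1).toNat "green" else c1

-- ===== PRECONDITION & SPEC =====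
def Spec_colorarray (n : Int) (left : Int) (mid : Int) (right : Int) (out : List String) : Prop := out = colorarray_alt n left mid right
instance (n : Int) (left : Int) (mid : Int) (right : Int) (out : List String) : Decidable (Spec_colorarray n left mid right out) := by unfold Spec_colorarray; infer_instance

-- ===== CLAIM (what is proved, stated in full; the proofs are below) =====
def Claim_equal_colorarray : Prop := ∀ (n : Int) (left : Int) (mid : Int) (right : Int), Dom_colorarray n left mid right → Spec_colorarray n left mid right (colorarray n left mid right)

-- ===== LEMMAS AND PROOFS =====

theorem colorarray_eq_map (n left mid right : Int) :
    colorarray n left mid right =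
      (PySem.List.pyRange 0 n 1).map
        (fun i =>
          if i ≥ left ∧ i ≤ right then
            if i ≥ left ∧ i ≤ mid then "yellow" else "green"
          else "blue") := by
  unfold colorarray
  have key : ∀ (l : List Int) (acc : List String),
      l.foldl
        (fun colorarr i =>
          if i ≥ left ∧ i ≤ right then
            if i ≥ left ∧ i ≤ mid then colorarr ++ ["yellow"]
            else colorarr ++ ["green"]
          else colorarr ++ ["blue"]) acc =
      acc ++ l.map
        (fun i =>
          if i ≥ left ∧ i ≤ right then
            if i ≥ left ∧ i ≤ mid then "yellow" else "green"
          else "blue") := by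
    intro l
    induction l with
    | nil => simp
    | cons x t ih =>
      intro acc
      simp only [List.foldl, List.map]
      rw [ih]
      split_ifs <;> simp
  simpa using key (PySem.List.pyRange 0 n 1) []

theorem pvSetRange_length (xs : List String) (lo len : Nat) (s : String)
    (h : lo + len ≤ xs.length) : (pvSetRange xs lo len s).length = xs.length := by
  simp [pvSetRange]; omega

theorem pvSetRange_getElem? (xs : List String) (lo len : Nat) (s : String) (i : Nat)
    (h : lo + len ≤ xs.length) :
    (pvSetRange xs lo len s)[i]? =
      if lo ≤ i ∧ i < lo + len then some s else xs[i]? := by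
  unfold pvSetRange
  by_cases h1 : i < lo
  · rw [List.getElem?_append_left (by simp; omega),
      List.getElem?_append_left (by simp; omega), if_neg (by omega)]
    simp [h1]
  · by_cases h2 : i < lo + len
    · rw [List.getElem?_append_left (by simp; omega),
        List.getElem?_append_right (by simp; omega)]
      simp only [List.length_take]
      rw [List.getElem?_replicate, if_pos (by omega), if_pos ⟨by omega, h2⟩]
    · rw [List.getElem?_append_right (by simp; omega), if_neg (by omega)]
      simp only [List.length_append, List.length_take, List.length_replicate,
        List.getElem?_drop]
      congr 1
      omega

-- one clamped slice assignment, characterised pointwise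
theorem pv_step_getElem? (xs : List String) (N : Nat) (hxs : xs.length = N)
    (lo hi : Int) (s : String) (i : Nat) (hlo : 0 ≤ lo) (hhi : hi < N) :
    (if lo ≤ hi then pvSetRange xs lo.toNat (hi - lo + 1).toNat s else xs)[i]? =
      if lo ≤ (i : Int) ∧ (i : Int) ≤ hi then some s else xs[i]? := by
  by_cases hc : lo ≤ hi
  · rw [if_pos hc, pvSetRange_getElem? _ _ _ _ _ (by omega)]
    by_cases hr : lo ≤ (i : Int) ∧ (i : Int) ≤ hi
    · rw [if_pos (by omega), if_pos hr]
    · rw [if_neg (by omega), if_neg hr]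
  · rw [if_neg hc, if_neg (by omega)]

theorem pv_step_length (xs : List String) (N : Nat) (hxs : xs.length = N)
    (lo hi : Int) (s : String) (hlo : 0 ≤ lo) (hhi : hi < N) :
    (if lo ≤ hi then pvSetRange xs lo.toNat (hi - lo + 1).toNat s else xs).length = N := by
  split_ifs with hc
  · rw [pvSetRange_length _ _ _ _ (by omega)]; exact hxs
  · exact hxs

-- ===== VERDICT (by name: the statement is the Claim_ definition above) =====
theorem colorarray_spec : Claim_equal_colorarray := by
  intro n left mid right _
  unfold Spec_colorarray
  rw [colorarray_eq_map]
  unfold colorarray_alt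
  simp only
  have hbaselen : (List.replicate (max n 0).toNat "blue").length = n.toNat := by simp; omega
  have hc1len := pv_step_length (List.replicate (max n 0).toNat "blue") n.toNat hbaselen
    (max left 0) (min (min mid right) (n - 1)) "yellow" (by omega) (by omega)
  have houtlen := pv_step_length _ n.toNat hc1len
    (max (max left (mid + 1)) 0) (min right (n - 1)) "green" (by omega) (by omega)
  apply List.ext_getElem?
  intro i
  by_cases hin : i < n.toNat
  · rw [List.getElem?_map, PySem.List.getElem?_pyRange_one, if_pos (by omega)]
    rw [pv_step_getElem? _ n.toNat hc1len _ _ _ _ (by omega) (by omega)]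
    rw [pv_step_getElem? _ n.toNat hbaselen _ _ _ _ (by omega) (by omega)]
    rw [List.getElem?_replicate, if_pos (show i < (max n 0).toNat by omega)]
    simp only [Option.map_some, zero_add]
    by_cases hg : max (max left (mid + 1)) 0 ≤ (i : Int) ∧ (i : Int) ≤ min right (n - 1)
    · have h1 : (i : Int) ≥ left ∧ (i : Int) ≤ right := by omega
      have h2 : ¬((i : Int) ≥ left ∧ (i : Int) ≤ mid) := by omega
      rw [if_pos hg, if_pos h1, if_neg h2]
    · rw [if_neg hg]
      by_cases hy : max left 0 ≤ (i : Int) ∧ (i : Int) ≤ min (min mid right) (n - 1)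
      · have h1 : (i : Int) ≥ left ∧ (i : Int) ≤ right := by omega
        have h2 : (i : Int) ≥ left ∧ (i : Int) ≤ mid := by omega
        rw [if_pos hy, if_pos h1, if_pos h2]
      · have h1 : ¬((i : Int) ≥ left ∧ (i : Int) ≤ right) := by omega
        rw [if_neg hy, if_neg h1]
  · rw [List.getElem?_eq_none
        (by rw [List.length_map, PySem.List.length_pyRange_one]; omega),
      List.getElem?_eq_none (by rw [houtlen]; omega)]
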